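-- pv_equiv track=rewrite | github.com/overshard/darkfurrow.com | almanac.py | parse_list_items
-- ===== SOURCE A (Python) =====
-- def parse_list_items(body):
--     lines = body.split('\n')
--     bullets = []
--     prose = []
--     in_prose = False
--     current_prose = ''
--
--     for line in lines:
--         trimmed = line.strip()
--         if trimmed.startswith('- '):
--             if in_prose and current_prose:
--                 prose.append(current_prose.strip())
--                 current_prose = ''
--                 in_prose = False
--             bullets.append(trimmed[2:])
--         elif trimmed == '':
--             if in_prose and current_prose:
--                 prose.append(current_prose.strip())
--                 current_prose = ''
--                 in_prose = False
--         else: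
--             in_prose = True
--             current_prose += (' ' if current_prose else '') + trimmed
--
--     if in_prose and current_prose:
--         prose.append(current_prose.strip())
--
--     return {'bullets': bullets, 'prose': prose}
-- ===== SOURCE B (Python) =====
-- def parse_list_items(body):
--     ts = [line.strip() for line in body.split('\n')]
--     is_sep = lambda t: t == '' or t.startswith('- ')
--     bullets = [t[2:] for t in ts if t.startswith('- ')]
--     prose = []
--     i, n = 0, len(ts)
--     while i < n:
--         if is_sep(ts[i]):
--             i += 1
--         else:
--             j = i
--             while j < n and not is_sep(ts[j]):
--                 j += 1
--             prose.append(' '.join(ts[i:j]))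
--             i = j
--     return {'bullets': bullets, 'prose': prose}
-- ===== Notes on version B (the rewrite author's own statement) =====
-- stated objective: simpler
-- what changed: A's single interleaved state machine (in_prose flag plus a growing current_prose string flushed on bullets/blanks) is replaced by two independent passes: a filter-and-slice comprehension for bullets, and a separate run-grouping scan that joins each maximal non-blank non-bullet run with single spaces for prose.
import Mathlib
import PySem

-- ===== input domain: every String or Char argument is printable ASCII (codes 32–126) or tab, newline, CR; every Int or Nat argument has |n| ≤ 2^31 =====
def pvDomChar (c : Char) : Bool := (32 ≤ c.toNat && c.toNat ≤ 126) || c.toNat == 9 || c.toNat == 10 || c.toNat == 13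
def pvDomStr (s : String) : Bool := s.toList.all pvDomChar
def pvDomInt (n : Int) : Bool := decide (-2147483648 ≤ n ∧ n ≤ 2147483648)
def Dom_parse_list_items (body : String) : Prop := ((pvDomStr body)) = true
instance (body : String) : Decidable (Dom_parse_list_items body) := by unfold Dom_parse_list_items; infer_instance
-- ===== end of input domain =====

-- B replaces A's interleaved in_prose/current_prose state machine by two independent passes
-- (a filter for bullets, a run-grouping scan joined with spaces for prose); objective: simpler decomposition.


-- ===== PORT A =====
-- state: (bullets, prose, in_prose, current_prose); strings kept as List Char (PySem convention)
def pvStepA (st : List (List Char) × List (List Char) × Bool × List Char)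
    (line : List Char) : List (List Char) × List (List Char) × Bool × List Char :=
  match st with
  | (bullets, prose, in_prose, current_prose) =>
    let trimmed := PySem.Chars.strip line
    if PySem.Chars.startswith trimmed ['-', ' '] then
      if in_prose && !current_prose.isEmpty then
        (bullets ++ [PySem.List.slice trimmed (some 2) none],
         prose ++ [PySem.Chars.strip current_prose], false, [])
      else
        (bullets ++ [PySem.List.slice trimmed (some 2) none], prose, in_prose, current_prose)
    else if trimmed.isEmpty then
      if in_prose && !current_prose.isEmpty then
        (bullets, prose ++ [PySem.Chars.strip current_prose], false, [])
      else
        (bullets, prose, in_prose, current_prose)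
    else
      (bullets, prose, true,
       current_prose ++ (if current_prose.isEmpty then [] else [' ']) ++ trimmed)

def parse_list_items (body : String) : List (String × List String) :=
  let lines := PySem.Chars.splitOn body.toList ['\n']
  match lines.foldl pvStepA ([], [], false, []) with
  | (bullets, prose, in_prose, current_prose) =>
    let prose :=
      if in_prose && !current_prose.isEmpty then prose ++ [PySem.Chars.strip current_prose]
      else prose
    [("bullets", bullets.map String.ofList), ("prose", prose.map String.ofList)]

-- ===== PORT B =====
def pvIsSep (t : List Char) : Bool := t.isEmpty || PySem.Chars.startswith t ['-', ' ']

def pvBullets (ts : List (List Char)) : List (List Char) :=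
  (ts.filter (fun t => PySem.Chars.startswith t ['-', ' '])).map
    (fun t => PySem.List.slice t (some 2) none)

-- the run-grouping scan of Source B: skip separators; otherwise take the maximal non-separator
-- run, join it with single spaces, continue after it
def pvRuns : List (List Char) → List (List Char)
  | [] => []
  | t :: rest =>
    if pvIsSep t then pvRuns rest
    else
      PySem.Chars.join [' '] (t :: rest.takeWhile (fun u => !pvIsSep u)) ::
        pvRuns (rest.dropWhile (fun u => !pvIsSep u))
termination_by ts => ts.length
decreasing_by
  · simp
  · have := List.length_dropWhile_le (fun u => !pvIsSep u) rest
    simp; omega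

def parse_list_items_alt (body : String) : List (String × List String) :=
  let ts := (PySem.Chars.splitOn body.toList ['\n']).map PySem.Chars.strip
  [("bullets", (pvBullets ts).map String.ofList), ("prose", (pvRuns ts).map String.ofList)]

-- ===== PRECONDITION & SPEC =====
def Spec_parse_list_items (body : String) (out : List (String × List String)) : Prop := out = parse_list_items_alt body
instance (body : String) (out : List (String × List String)) : Decidable (Spec_parse_list_items body out) := by unfold Spec_parse_list_items; infer_instance

-- ===== CLAIM (what is proved, stated in full; the proofs are below) =====
def Claim_equal_parse_list_items : Prop := ∀ (body : String), Dom_parse_list_items body → Spec_parse_list_items body (parse_list_items body)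

-- ===== LEMMAS AND PROOFS =====

-- A's step on the already-stripped line
def pvStepA' (st : List (List Char) × List (List Char) × Bool × List Char)
    (t : List Char) : List (List Char) × List (List Char) × Bool × List Char :=
  match st with
  | (bullets, prose, in_prose, current_prose) =>
    if PySem.Chars.startswith t ['-', ' '] then
      if in_prose && !current_prose.isEmpty then
        (bullets ++ [PySem.List.slice t (some 2) none],
         prose ++ [PySem.Chars.strip current_prose], false, [])
      else
        (bullets ++ [PySem.List.slice t (some 2) none], prose, in_prose, current_prose)
    else if t.isEmpty then
      if in_prose && !current_prose.isEmpty then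
        (bullets, prose ++ [PySem.Chars.strip current_prose], false, [])
      else
        (bullets, prose, in_prose, current_prose)
    else
      (bullets, prose, true, current_prose ++ (if current_prose.isEmpty then [] else [' ']) ++ t)

-- A's run grouping with an optional pending paragraph, stripping at flush (as A does)
def pvRunA : Option (List Char) → List (List Char) → List (List Char)
  | pend, [] => pend.elim [] (fun c => [PySem.Chars.strip c])
  | pend, t :: rest =>
    if pvIsSep t then pend.elim [] (fun c => [PySem.Chars.strip c]) ++ pvRunA none rest
    else pvRunA (some (pend.elim t (fun c => c ++ [' '] ++ t))) rest

-- the final flush of A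
def pvFinish (st : List (List Char) × List (List Char) × Bool × List Char) :
    List (List Char) × List (List Char) :=
  (st.1, if st.2.2.1 && !st.2.2.2.isEmpty then st.2.1 ++ [PySem.Chars.strip st.2.2.2] else st.2.1)

lemma pvBullets_cons (t : List Char) (ts : List (List Char)) :
    pvBullets (t :: ts) =
      (if PySem.Chars.startswith t ['-', ' ']
       then [PySem.List.slice t (some 2) none] else []) ++ pvBullets ts := by
  simp only [pvBullets, List.filter_cons]
  split_ifs <;> simp

lemma pvFoldA_main (ts : List (List Char)) :
    ∀ bs ps (inp : Bool) cur, (cur = [] ∨ inp = true) →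
      pvFinish (ts.foldl pvStepA' (bs, ps, inp, cur))
        = (bs ++ pvBullets ts, ps ++ pvRunA (if cur.isEmpty then none else some cur) ts) := by
  induction ts with
  | nil =>
    intro bs ps inp cur h
    rcases h with h | h
    · subst h; simp [pvFinish, pvBullets, pvRunA]
    · subst h
      cases hc : cur.isEmpty
      · simp [pvFinish, pvBullets, pvRunA, hc]
      · have : cur = [] := by simpa [List.isEmpty_iff] using hc
        subst this; simp [pvFinish, pvBullets, pvRunA]
  | cons t rest ih =>
    intro bs ps inp cur h
    have hcur : (cur = [] ∧ cur.isEmpty = true) ∨ (cur ≠ [] ∧ cur.isEmpty = false ∧ inp = true) := by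
      rcases h with h | h
      · exact Or.inl ⟨h, by simp [h]⟩
      · by_cases hc : cur = []
        · exact Or.inl ⟨hc, by simp [hc]⟩
        · exact Or.inr ⟨hc, by simp [hc], h⟩
    by_cases hb : PySem.Chars.startswith t ['-', ' '] = true
    · have hsep : pvIsSep t = true := by simp [pvIsSep, hb]
      rcases hcur with ⟨h1, h2⟩ | ⟨h1, h2, h3⟩
      · subst h1
        simp only [List.foldl_cons, pvStepA', hb, if_true, List.isEmpty_nil, Bool.not_true,
          Bool.and_false, Bool.false_eq_true, if_false]
        rw [ih _ _ inp [] (Or.inl rfl)]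
        simp [pvBullets_cons, hb, pvRunA, hsep]
      · subst h3
        simp only [List.foldl_cons, pvStepA', hb, if_true, h2, Bool.not_false, Bool.and_true]
        rw [ih _ _ false [] (Or.inl rfl)]
        simp [pvBullets_cons, hb, pvRunA, hsep]
    · by_cases he : t.isEmpty = true
      · have hsep : pvIsSep t = true := by simp [pvIsSep, he]
        rcases hcur with ⟨h1, h2⟩ | ⟨h1, h2, h3⟩
        · subst h1
          simp only [List.foldl_cons, pvStepA', hb, Bool.false_eq_true, if_false, he, if_true,
            List.isEmpty_nil, Bool.not_true, Bool.and_false]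
          rw [ih _ _ inp [] (Or.inl rfl)]
          simp [pvBullets_cons, hb, pvRunA, hsep]
        · subst h3
          simp only [List.foldl_cons, pvStepA', hb, Bool.false_eq_true, if_false, he, if_true,
            h2, Bool.not_false, Bool.and_true]
          rw [ih _ _ false [] (Or.inl rfl)]
          simp [pvBullets_cons, hb, pvRunA, hsep]
      · -- non-separator line
        have hsep : pvIsSep t = false := by simp [pvIsSep] at *; exact ⟨he, hb⟩
        have htne : ¬ t.isEmpty = true := he
        simp only [List.foldl_cons, pvStepA', hb, Bool.false_eq_true, if_false, he]
        rcases hcur with ⟨h1, h2⟩ | ⟨h1, h2, h3⟩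
        · subst h1
          simp only [List.isEmpty_nil, if_true, List.nil_append, List.append_nil]
          rw [ih _ _ true t (Or.inr rfl)]
          have htne' : t.isEmpty = false := by cases hx : t.isEmpty <;> simp_all
          simp [pvBullets_cons, hb, pvRunA, hsep, htne']
        · subst h3
          simp only [h2, Bool.false_eq_true, if_false]
          rw [ih _ _ true (cur ++ [' '] ++ t) (Or.inr rfl)]
          have hne' : (cur ++ [' '] ++ t).isEmpty = false := by simp
          simp [pvBullets_cons, hb, pvRunA, hsep]

-- ---- strip facts ----

lemma pvLstrip_idem (s : List Char) :
    PySem.Chars.lstrip (PySem.Chars.lstrip s) = PySem.Chars.lstrip s :=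
  List.dropWhile_idempotent _ _

lemma pvRstrip_idem (s : List Char) :
    PySem.Chars.rstrip (PySem.Chars.rstrip s) = PySem.Chars.rstrip s := by
  simp [PySem.Chars.rstrip, List.dropWhile_idempotent]

lemma pvHead_nonspace (a : Char) (v : List Char) (h : PySem.Chars.lstrip (a :: v) = a :: v) :
    PySem.Chars.isspace a = false := by
  by_contra hs
  have hs' : PySem.Chars.isspace a = true := by revert hs; cases PySem.Chars.isspace a <;> simp
  have hd : PySem.Chars.lstrip (a :: v) = List.dropWhile PySem.Chars.isspace v := by
    simp [PySem.Chars.lstrip, hs']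
  rw [hd] at h
  have := List.length_dropWhile_le PySem.Chars.isspace v
  rw [h] at this; simp at this

lemma pvLstrip_fix_append (c x : List Char) (h : PySem.Chars.lstrip c = c) (hc : c ≠ []) :
    PySem.Chars.lstrip (c ++ x) = c ++ x := by
  obtain ⟨a, v, rfl⟩ := List.exists_cons_of_ne_nil hc
  have ha := pvHead_nonspace a v h
  simp [PySem.Chars.lstrip, ha]

lemma pvRstrip_fix_append (t x : List Char) (h : PySem.Chars.rstrip t = t) (ht : t ≠ []) :
    PySem.Chars.rstrip (x ++ t) = x ++ t := by
  have hrev : List.dropWhile PySem.Chars.isspace t.reverse = t.reverse := by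
    have := congrArg List.reverse h
    simpa [PySem.Chars.rstrip] using this
  obtain ⟨d, w, hdw⟩ := List.exists_cons_of_ne_nil (by simp [ht] : t.reverse ≠ [])
  have hd : PySem.Chars.isspace d = false := pvHead_nonspace d w (by rw [← hdw]; exact hrev)
  simp only [PySem.Chars.rstrip, List.reverse_append, hdw, List.cons_append,
    List.dropWhile_cons, hd, Bool.false_eq_true, if_false]
  rw [← List.cons_append, ← hdw]
  simp

lemma pvLstrip_rstrip_fix (u : List Char) (h : PySem.Chars.lstrip u = u) :
    PySem.Chars.lstrip (PySem.Chars.rstrip u) = PySem.Chars.rstrip u := by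
  rcases u with _ | ⟨a, v⟩
  · rfl
  · have ha := pvHead_nonspace a v h
    simp only [PySem.Chars.rstrip, List.reverse_cons, List.dropWhile_append]
    split
    · simp [PySem.Chars.lstrip, ha]
    · simp only [List.reverse_append, List.reverse_cons, List.reverse_nil, List.nil_append,
        List.cons_append]
      simp [PySem.Chars.lstrip, ha]

lemma pvStrip_idem (s : List Char) :
    PySem.Chars.strip (PySem.Chars.strip s) = PySem.Chars.strip s := by
  have h1 : PySem.Chars.lstrip (PySem.Chars.lstrip s) = PySem.Chars.lstrip s := pvLstrip_idem s
  calc PySem.Chars.strip (PySem.Chars.strip s)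
      = PySem.Chars.rstrip (PySem.Chars.lstrip (PySem.Chars.rstrip (PySem.Chars.lstrip s))) := rfl
    _ = PySem.Chars.rstrip (PySem.Chars.rstrip (PySem.Chars.lstrip s)) := by
        rw [pvLstrip_rstrip_fix _ h1]
    _ = PySem.Chars.rstrip (PySem.Chars.lstrip s) := pvRstrip_idem _
    _ = PySem.Chars.strip s := rfl

lemma pvStrip_parts (s : List Char) (h : PySem.Chars.strip s = s) :
    PySem.Chars.lstrip s = s ∧ PySem.Chars.rstrip s = s := by
  have hsuf : PySem.Chars.lstrip s <:+ s := List.dropWhile_suffix _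
  have hlen1 : (PySem.Chars.lstrip s).length ≤ s.length := List.length_dropWhile_le _ _
  have hlen2 : s.length ≤ (PySem.Chars.lstrip s).length := by
    conv_lhs => rw [← h]
    simp only [PySem.Chars.strip, PySem.Chars.rstrip, List.length_reverse]
    calc (List.dropWhile PySem.Chars.isspace (PySem.Chars.lstrip s).reverse).length
        ≤ (PySem.Chars.lstrip s).reverse.length := List.length_dropWhile_le _ _
      _ = (PySem.Chars.lstrip s).length := by simp
  have hl : PySem.Chars.lstrip s = s := hsuf.sublist.eq_of_length (le_antisymm hlen1 hlen2)
  refine ⟨hl, ?_⟩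
  calc PySem.Chars.rstrip s = PySem.Chars.rstrip (PySem.Chars.lstrip s) := by rw [hl]
    _ = s := h

lemma pvStrip_glue (c t : List Char) (hc : PySem.Chars.strip c = c) (hcne : c ≠ [])
    (ht : PySem.Chars.strip t = t) (htne : t ≠ []) :
    PySem.Chars.strip (c ++ [' '] ++ t) = c ++ [' '] ++ t := by
  have hl : PySem.Chars.lstrip (c ++ ([' '] ++ t)) = c ++ ([' '] ++ t) :=
    pvLstrip_fix_append c _ (pvStrip_parts c hc).1 hcne
  have hr : PySem.Chars.rstrip ((c ++ [' ']) ++ t) = (c ++ [' ']) ++ t :=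
    pvRstrip_fix_append t _ (pvStrip_parts t ht).2 htne
  show PySem.Chars.rstrip (PySem.Chars.lstrip (c ++ [' '] ++ t)) = c ++ [' '] ++ t
  rw [List.append_assoc, hl, ← List.append_assoc, hr]

-- ---- B's runs agree with A's run grouping on strip-fixed lines ----

lemma pvJoin_shift (c t : List Char) (xs : List (List Char)) :
    PySem.Chars.join [' '] ((c ++ [' '] ++ t) :: xs)
      = c ++ [' '] ++ PySem.Chars.join [' '] (t :: xs) := by
  cases xs with
  | nil => simp [PySem.Chars.join_singleton]
  | cons x xs' => simp [PySem.Chars.join_cons_cons]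

lemma pvRuns_nil : pvRuns [] = [] := by rw [pvRuns.eq_def]

lemma pvRuns_cons (t : List Char) (rest : List (List Char)) :
    pvRuns (t :: rest) =
      if pvIsSep t then pvRuns rest
      else
        PySem.Chars.join [' '] (t :: rest.takeWhile (fun u => !pvIsSep u)) ::
          pvRuns (rest.dropWhile (fun u => !pvIsSep u)) := by
  rw [pvRuns.eq_def]

lemma pvRunA_eq_pvRuns (ts : List (List Char)) (hfix : ∀ t ∈ ts, PySem.Chars.strip t = t) :
    pvRunA none ts = pvRuns ts
    ∧ ∀ c, PySem.Chars.strip c = c → c ≠ [] →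
        pvRunA (some c) ts
          = PySem.Chars.join [' '] (c :: ts.takeWhile (fun u => !pvIsSep u))
              :: pvRuns (ts.dropWhile (fun u => !pvIsSep u)) := by
  induction ts with
  | nil =>
    refine ⟨by rw [pvRuns_nil]; rfl, fun c hc hcne => ?_⟩
    simp [pvRunA, pvRuns_nil, hc, PySem.Chars.join_singleton]
  | cons t rest ih =>
    have hfix' : ∀ u ∈ rest, PySem.Chars.strip u = u := fun u hu => hfix u (by simp [hu])
    obtain ⟨ih1, ih2⟩ := ih hfix'
    have htfix : PySem.Chars.strip t = t := hfix t (by simp)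
    constructor
    · by_cases hsep : pvIsSep t = true
      · rw [pvRuns_cons]
        simp [pvRunA, hsep, ih1]
      · have htne : t ≠ [] := by
          intro h; subst h; simp [pvIsSep] at hsep
        have hs : pvIsSep t = false := by cases h : pvIsSep t <;> simp_all
        rw [pvRuns_cons]
        simp only [pvRunA, hs, Bool.false_eq_true, if_false, Option.elim]
        rw [ih2 t htfix htne]
    · intro c hc hcne
      by_cases hsep : pvIsSep t = true
      · simp only [List.takeWhile_cons, List.dropWhile_cons, hsep, Bool.not_true,
          Bool.false_eq_true, if_false]
        rw [pvRuns_cons]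
        simp [pvRunA, hsep, ih1, hc, PySem.Chars.join_singleton]
      · have htne : t ≠ [] := by
          intro h; subst h; simp [pvIsSep] at hsep
        have hs : pvIsSep t = false := by cases h : pvIsSep t <;> simp_all
        simp only [pvRunA, hs, Bool.false_eq_true, if_false, Option.elim]
        rw [ih2 (c ++ [' '] ++ t) (pvStrip_glue c t hc hcne htfix htne) (by simp)]
        simp only [List.takeWhile_cons, List.dropWhile_cons, hs, Bool.not_false, if_true]
        rw [pvJoin_shift, PySem.Chars.join_cons_cons]

-- ===== VERDICT (by name: the statement is the Claim_ definition above) =====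
theorem parse_list_items_spec : Claim_equal_parse_list_items := by
  intro body _
  show parse_list_items body = parse_list_items_alt body
  unfold parse_list_items parse_list_items_alt
  dsimp only
  set lines := PySem.Chars.splitOn body.toList ['\n'] with hlines
  set ts := lines.map PySem.Chars.strip with hts
  have hfold : lines.foldl pvStepA ([], [], false, []) = ts.foldl pvStepA' ([], [], false, []) := by
    rw [hts, List.foldl_map]; rfl
  have hfix : ∀ t ∈ ts, PySem.Chars.strip t = t := by
    intro t ht
    rw [hts] at ht
    obtain ⟨l, _, rfl⟩ := List.mem_map.mp ht
    exact pvStrip_idem l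
  have hmain := pvFoldA_main ts [] [] false [] (Or.inl rfl)
  have hruns := (pvRunA_eq_pvRuns ts hfix).1
  rw [hfold]
  rcases hst : ts.foldl pvStepA' ([], [], false, []) with ⟨bs, ps, inp, cur⟩
  rw [hst] at hmain
  simp only [pvFinish, List.nil_append, List.isEmpty_nil, Prod.mk.injEq] at hmain
  obtain ⟨hb, hp⟩ := hmain
  have hp' : (if (inp && !cur.isEmpty) = true then ps ++ [PySem.Chars.strip cur] else ps)
      = pvRunA none ts := by simpa using hp
  simp only [hb, hp', hruns]
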